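-- pv_equiv track=rewrite | github.com/Liorcicurel/Goldbach-s-conjecture | Goldbach's conjecture.py | check_goldbach_for_num_stats
-- ===== SOURCE A (Python) =====
-- def check_goldbach_for_num_stats(n, primes_set):
--     cnt=0
--     for item in primes_set:
--         if n-int(item) in primes_set:
--             cnt+=1
--             if n-int(item) == int(item):
--                 cnt+=1
--     return int(cnt/2)
-- ===== SOURCE B (Python) =====
-- def check_goldbach_for_num_stats(n, primes_set):
--     counts = {}
--     for item in primes_set:
--         p = int(item)
--         counts[p] = counts.get(p, 0) + 1
--     vals = sorted(counts)
--     total = 0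
--     i, j = 0, len(vals) - 1
--     while i <= j:
--         s = vals[i] + vals[j]
--         if s == n:
--             if i == j:
--                 total += 2 * counts[vals[i]]
--             else:
--                 total += counts[vals[i]] + counts[vals[j]]
--             i += 1
--             j -= 1
--         elif s < n:
--             i += 1
--         else:
--             j -= 1
--     return total // 2
-- ===== Notes on version B (the rewrite author's own statement) =====
-- stated objective: alternative
-- what changed: Replaces A's per-element membership scan with a sorted two-pointer sweep: build a multiplicity table, sort the distinct values, and move indices i and j inward over the sorted list, crediting the multiplicities of each endpoint pair that sums to n (the i==j self-pair credited twice), then halve.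
import Mathlib
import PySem

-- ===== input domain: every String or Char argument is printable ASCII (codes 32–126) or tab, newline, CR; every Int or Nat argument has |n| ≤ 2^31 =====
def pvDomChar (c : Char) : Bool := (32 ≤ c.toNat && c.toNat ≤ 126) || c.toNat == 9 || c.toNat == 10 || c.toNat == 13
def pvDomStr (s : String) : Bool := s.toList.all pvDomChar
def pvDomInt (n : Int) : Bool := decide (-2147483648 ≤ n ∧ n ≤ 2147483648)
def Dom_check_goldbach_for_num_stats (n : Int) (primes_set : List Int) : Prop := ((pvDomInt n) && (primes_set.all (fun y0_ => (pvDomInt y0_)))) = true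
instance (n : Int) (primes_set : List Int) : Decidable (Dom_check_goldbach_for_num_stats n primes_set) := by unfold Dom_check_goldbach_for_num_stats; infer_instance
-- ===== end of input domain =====

-- B replaces A's per-element membership scan of the list by a multiplicity table over the
-- distinct values plus a sorted two-pointer sweep moving inward from both ends of the window.


-- ===== PORT A =====
def check_goldbach_for_num_stats (n : Int) (primes_set : List Int) : Int :=
  let cnt : Int := primes_set.foldl (fun cnt item =>
    if (n - item) ∈ primes_set then
      (if (n - item) == item then (cnt + 1) + 1 else cnt + 1)
    else cnt) 0
  PySem.Int.truncdiv cnt 2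

-- ===== PORT B =====
-- the index-based two-pointer while loop; i walks up, j walks down, total accumulates
def pvSweepIdx (n : Int) (d : PySem.Dict Int Int) (vals : List Int) (i j total : Int) : Int :=
  if _h : i ≤ j then
    let s := PySem.List.pyGetD vals i 0 + PySem.List.pyGetD vals j 0
    if s = n then
      pvSweepIdx n d vals (i + 1) (j - 1)
        (if i = j then total + 2 * d.getD (PySem.List.pyGetD vals i 0) 0
         else total + d.getD (PySem.List.pyGetD vals i 0) 0 + d.getD (PySem.List.pyGetD vals j 0) 0)
    else if s < n then pvSweepIdx n d vals (i + 1) j total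
    else pvSweepIdx n d vals i (j - 1) total
  else total
termination_by (j + 1 - i).toNat
decreasing_by
  all_goals omega

def check_goldbach_for_num_stats_alt (n : Int) (primes_set : List Int) : Int :=
  let counts : PySem.Dict Int Int :=
    primes_set.foldl (fun d item => d.insert item (d.getD item 0 + 1)) PySem.Dict.empty
  let vals := PySem.List.sorted counts.keys (fun x => x) false
  PySem.Int.floordiv (pvSweepIdx n counts vals 0 ((vals.length : Int) - 1) 0) 2

-- ===== PRECONDITION & SPEC =====
def Spec_check_goldbach_for_num_stats (n : Int) (primes_set : List Int) (out : Int) : Prop := out = check_goldbach_for_num_stats_alt n primes_set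
instance (n : Int) (primes_set : List Int) (out : Int) : Decidable (Spec_check_goldbach_for_num_stats n primes_set out) := by unfold Spec_check_goldbach_for_num_stats; infer_instance

-- ===== CLAIM (what is proved, stated in full; the proofs are below) =====
def Claim_equal_check_goldbach_for_num_stats : Prop := ∀ (n : Int) (primes_set : List Int), Dom_check_goldbach_for_num_stats n primes_set → Spec_check_goldbach_for_num_stats n primes_set (check_goldbach_for_num_stats n primes_set)

-- ===== LEMMAS AND PROOFS =====

-- the sweep re-expressed on the shrinking window of the sorted value list
def pvSweep (n : Int) (d : PySem.Dict Int Int) : List Int → Int → Int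
  | [], total => total
  | x :: rest, total =>
    let y := (x :: rest).getLast (by simp)
    if x + y = n then
      pvSweep n d rest.dropLast
        (if rest = [] then total + 2 * d.getD x 0 else total + d.getD x 0 + d.getD y 0)
    else if x + y < n then pvSweep n d rest total
    else pvSweep n d (x :: rest).dropLast total
termination_by seg => seg.length
decreasing_by
  all_goals simp [List.length_dropLast]

theorem pvSweepIdx_eq_window (n : Int) (d : PySem.Dict Int Int) (vals : List Int) :
    ∀ (k : Nat) (i j : Int), (j + 1 - i).toNat ≤ k → 0 ≤ i → j < (vals.length : Int) → ∀ total,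
      pvSweepIdx n d vals i j total
        = pvSweep n d ((vals.drop i.toNat).take (j - i + 1).toNat) total := by
  intro k
  induction k with
  | zero =>
    intro i j hk h0 hj total
    have hij : ¬ i ≤ j := by omega
    rw [pvSweepIdx, dif_neg hij]
    have : (j - i + 1).toNat = 0 := by omega
    rw [this]
    simp [pvSweep]
  | succ k ih =>
    intro i j hk h0 hj total
    by_cases hij : i ≤ j
    · -- the window is nonempty
      have hjn : j.toNat < vals.length := by omega
      have hwl : ((vals.drop i.toNat).take (j - i + 1).toNat).length = (j - i + 1).toNat := by
        simp [List.length_take, List.length_drop]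
        omega
      have hwpos : 0 < ((vals.drop i.toNat).take (j - i + 1).toNat).length := by omega
      have hwget : ∀ (m : Nat) (hm : m < ((vals.drop i.toNat).take (j - i + 1).toNat).length),
          ((vals.drop i.toNat).take (j - i + 1).toNat)[m] = vals[i.toNat + m]'(by omega) := by
        intro m hm
        rw [List.getElem_take, List.getElem_drop]
      obtain ⟨x, rest, hw⟩ : ∃ x rest, (vals.drop i.toNat).take (j - i + 1).toNat = x :: rest :=
        List.exists_cons_of_ne_nil (List.ne_nil_of_length_pos hwpos)
      have hlen : (x :: rest).length = (j - i + 1).toNat := by rw [← hw]; exact hwl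
      have hx : x = vals[i.toNat]'(by omega) := by
        simpa [hw] using hwget 0 (by omega)
      have hgl : (x :: rest).getLast (by simp) = vals[j.toNat]'hjn := by
        rw [List.getLast_eq_getElem]
        have h2 := hwget ((j - i + 1).toNat - 1) (by omega)
        have h3 : (x :: rest)[(x :: rest).length - 1]'(by omega)
            = ((vals.drop i.toNat).take (j - i + 1).toNat)[(j - i + 1).toNat - 1]'(by omega) :=
          getElem_congr hw.symm (by omega) (by omega)
        exact h3.trans (h2.trans (getElem_congr rfl (by omega) (by omega)))
      have hpi : PySem.List.pyGetD vals i 0 = vals[i.toNat]'(by omega) :=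
        PySem.List.pyGetD_eq_getElem vals 0 h0 (by omega)
      have hpj : PySem.List.pyGetD vals j 0 = vals[j.toNat]'hjn :=
        PySem.List.pyGetD_eq_getElem vals 0 (by omega) hj
      -- the three shrunken windows
      have htail : rest = (vals.drop (i + 1).toNat).take ((j - (i + 1) + 1)).toNat := by
        have : rest = ((vals.drop i.toNat).take (j - i + 1).toNat).tail := by rw [hw]; rfl
        rw [this, ← List.drop_one, List.drop_take, List.drop_drop]
        congr 1
        · omega
        · congr 1
          omega
      have hdroplast : (x :: rest).dropLast = (vals.drop i.toNat).take ((j - 1) - i + 1).toNat := by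
        rw [← hw, List.dropLast_eq_take, List.take_take, hwl]
        congr 1
        omega
      have hrestlast : rest.dropLast = (vals.drop (i + 1).toNat).take ((j - 1) - (i + 1) + 1).toNat := by
        rw [htail, List.dropLast_eq_take, List.take_take, List.length_take, List.length_drop]
        congr 1
        omega
      have hrestnil : (rest = []) ↔ (i = j) := by
        have hlr : rest.length + 1 = (j - i + 1).toNat := by simpa using hlen
        constructor
        · intro h; rw [h] at hlr; simp at hlr; omega
        · intro h
          exact List.eq_nil_of_length_eq_zero (by omega)
      rw [pvSweepIdx, dif_pos hij, hw, pvSweep, hgl]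
      simp only [hpi, hpj, ← hx]
      by_cases hs : x + vals[j.toNat]'hjn = n
      · rw [if_pos hs, if_pos hs, hrestlast, ← ih (i + 1) (j - 1) (by omega) (by omega) (by omega)]
        congr 1
        by_cases hieqj : i = j
        · rw [if_pos hieqj, if_pos (hrestnil.2 hieqj)]
        · rw [if_neg hieqj, if_neg (fun h => hieqj (hrestnil.1 h))]
      · rw [if_neg hs, if_neg hs]
        by_cases hlt : x + vals[j.toNat]'hjn < n
        · rw [if_pos hlt, if_pos hlt, htail, ← ih (i + 1) j (by omega) (by omega) hj]
        · rw [if_neg hlt, if_neg hlt, hdroplast, ← ih i (j - 1) (by omega) h0 (by omega)]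
    · rw [pvSweepIdx, dif_neg hij]
      have : (j - i + 1).toNat = 0 := by omega
      rw [this]
      simp [pvSweep]

def pvTerm (n : Int) (d : PySem.Dict Int Int) (seg : List Int) (x : Int) : Int :=
  (if (n - x) ∈ seg then d.getD x 0 else 0) + (if x + x = n then d.getD x 0 else 0)

theorem pvSweep_eq (n : Int) (d : PySem.Dict Int Int) :
    ∀ (k : Nat) (seg : List Int), seg.length ≤ k → seg.Pairwise (· < ·) → ∀ total,
      pvSweep n d seg total = total + (seg.map (pvTerm n d seg)).sum := by
  intro k
  induction k with
  | zero =>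
    intro seg hlen _ total
    have hnil : seg = [] := List.eq_nil_of_length_eq_zero (Nat.le_zero.1 hlen)
    subst hnil; simp [pvSweep]
  | succ k ih =>
    intro seg hlen hp total
    cases seg with
    | nil => simp [pvSweep]
    | cons x rest =>
      rcases rest.eq_nil_or_concat with rfl | ⟨mid, y, rfl⟩
      · -- seg = [x]
        have hiff : (n - x = x) ↔ (x + x = n) := by omega
        by_cases hxx : x + x = n
        · simp [pvSweep, pvTerm, hxx, hiff.2 hxx]
          ring
        · have h2 : ¬ (n - x = x) := fun h => hxx (hiff.1 h)
          rcases lt_trichotomy (x + x) n with hlt | heq | hgt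
          · simp [pvSweep, pvTerm, hxx, h2, hlt]
          · exact absurd heq hxx
          · simp [pvSweep, pvTerm, hxx, h2, not_lt.2 (le_of_lt hgt)]
      · -- seg = x :: (mid ++ [y])
        rw [List.concat_eq_append] at hlen hp ⊢
        have hconc : x :: (mid ++ [y]) = (x :: mid) ++ [y] := by simp
        have hgl : (x :: (mid ++ [y])).getLast (by simp) = y := by
          rw [List.getLast_congr (by simp) (by simp) hconc, List.getLast_concat]
        have hxlt : ∀ z ∈ mid ++ [y], x < z := (List.pairwise_cons.1 hp).1
        have hrestp : (mid ++ [y]).Pairwise (· < ·) := (List.pairwise_cons.1 hp).2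
        have hmidp : mid.Pairwise (· < ·) := (List.pairwise_append.1 hrestp).1
        have hmidy : ∀ z ∈ mid, z < y := fun z hz =>
          (List.pairwise_append.1 hrestp).2.2 z hz y (by simp)
        have hxy : x < y := hxlt y (by simp)
        have hmax : ∀ z ∈ x :: (mid ++ [y]), z ≤ y := by
          intro z hz
          rcases List.mem_cons.1 hz with rfl | hz'
          · exact le_of_lt hxy
          · rcases List.mem_append.1 hz' with hz'' | hz''
            · exact le_of_lt (hmidy z hz'')
            · exact le_of_eq (List.mem_singleton.1 hz'')
        have hmin : ∀ z ∈ x :: (mid ++ [y]), x ≤ z := by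
          intro z hz
          rcases List.mem_cons.1 hz with rfl | hz'
          · exact le_rfl
          · exact le_of_lt (hxlt z hz')
        have hmidlen : mid.length ≤ k := by simp at hlen; omega
        have hrestlen : (mid ++ [y]).length ≤ k := by simp at hlen ⊢; omega
        have hxmidlen : (x :: mid).length ≤ k := by simp at hlen ⊢; omega
        rcases lt_trichotomy (x + y) n with hlt | hs | hgt
        · -- s < n : drop the left end
          have hstep : pvSweep n d (x :: (mid ++ [y])) total = pvSweep n d (mid ++ [y]) total := by
            rw [pvSweep]
            simp only [hgl]
            rw [if_neg (by omega), if_pos hlt]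
          rw [hstep, ih _ hrestlen hrestp]
          congr 1
          have htx : pvTerm n d (x :: (mid ++ [y])) x = 0 := by
            have hnm : (n - x) ∉ x :: (mid ++ [y]) := fun hmem => by
              have := hmax _ hmem; omega
            simp [pvTerm, hnm]
            omega
          have hcong : ∀ z ∈ mid ++ [y],
              pvTerm n d (x :: (mid ++ [y])) z = pvTerm n d (mid ++ [y]) z := by
            intro z hz
            have hmem : (n - z) ∈ x :: (mid ++ [y]) ↔ (n - z) ∈ mid ++ [y] := by
              constructor
              · intro hm
                rcases List.mem_cons.1 hm with hx' | hm'
                · exfalso; have := hmax z (List.mem_cons_of_mem _ hz); omega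
                · exact hm'
              · exact List.mem_cons_of_mem _
            simp only [pvTerm, hmem]
          symm
          calc ((x :: (mid ++ [y])).map (pvTerm n d (x :: (mid ++ [y])))).sum
              = pvTerm n d (x :: (mid ++ [y])) x
                + ((mid ++ [y]).map (pvTerm n d (x :: (mid ++ [y])))).sum := by
                simp
            _ = ((mid ++ [y]).map (pvTerm n d (mid ++ [y]))).sum := by
                rw [htx, List.map_congr_left hcong]; ring
        · -- s = n : count both ends, shrink both
          have hstep : pvSweep n d (x :: (mid ++ [y])) total
              = pvSweep n d mid (total + d.getD x 0 + d.getD y 0) := by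
            rw [pvSweep]
            simp only [hgl]
            rw [if_pos hs, if_neg (by simp), List.dropLast_concat]
          rw [hstep, ih _ hmidlen hmidp]
          have htx : pvTerm n d (x :: (mid ++ [y])) x = d.getD x 0 := by
            have hm : (n - x) ∈ x :: (mid ++ [y]) := by
              have : n - x = y := by omega
              simp [this]
            simp [pvTerm, hm]
            omega
          have hty : pvTerm n d (x :: (mid ++ [y])) y = d.getD y 0 := by
            have hm : (n - y) ∈ x :: (mid ++ [y]) := by
              have : n - y = x := by omega
              simp [this]
            simp [pvTerm, hm]
            omega
          have hcong : ∀ z ∈ mid,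
              pvTerm n d (x :: (mid ++ [y])) z = pvTerm n d mid z := by
            intro z hz
            have hzy : z < y := hmidy z hz
            have hzx : x < z := hxlt z (List.mem_append_left _ hz)
            have hmem : (n - z) ∈ x :: (mid ++ [y]) ↔ (n - z) ∈ mid := by
              constructor
              · intro hm
                rcases List.mem_cons.1 hm with hx' | hm'
                · omega
                · rcases List.mem_append.1 hm' with h' | h'
                  · exact h'
                  · have := List.mem_singleton.1 h'; omega
              · intro hm; exact List.mem_cons_of_mem _ (List.mem_append_left _ hm)
            simp only [pvTerm, hmem]
          have hsum : ((x :: (mid ++ [y])).map (pvTerm n d (x :: (mid ++ [y])))).sum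
              = d.getD x 0 + d.getD y 0 + (mid.map (pvTerm n d mid)).sum := by
            calc ((x :: (mid ++ [y])).map (pvTerm n d (x :: (mid ++ [y])))).sum
                = pvTerm n d (x :: (mid ++ [y])) x
                  + ((mid.map (pvTerm n d (x :: (mid ++ [y])))).sum
                    + pvTerm n d (x :: (mid ++ [y])) y) := by
                  simp
              _ = d.getD x 0 + d.getD y 0 + (mid.map (pvTerm n d mid)).sum := by
                  rw [htx, hty, List.map_congr_left hcong]; ring
          rw [hsum]; ring
        · -- s > n : drop the right end
          have hstep : pvSweep n d (x :: (mid ++ [y])) total = pvSweep n d (x :: mid) total := by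
            rw [pvSweep]
            simp only [hgl]
            rw [if_neg (by omega), if_neg (by omega)]
            congr 1
            rw [hconc, List.dropLast_concat]
          have hxmidp : (x :: mid).Pairwise (· < ·) := by
            refine List.pairwise_cons.2 ⟨fun z hz => hxlt z (List.mem_append_left _ hz), hmidp⟩
          rw [hstep, ih _ hxmidlen hxmidp]
          congr 1
          have hty : pvTerm n d (x :: (mid ++ [y])) y = 0 := by
            have hnm : (n - y) ∉ x :: (mid ++ [y]) := fun hmem => by
              have := hmin _ hmem; omega
            simp [pvTerm, hnm]
            omega
          have hcong : ∀ z ∈ x :: mid,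
              pvTerm n d (x :: (mid ++ [y])) z = pvTerm n d (x :: mid) z := by
            intro z hz
            have hzle : z ≤ y := by
              rcases List.mem_cons.1 hz with rfl | hz'
              · exact le_of_lt hxy
              · exact le_of_lt (hmidy z hz')
            have hzge : x ≤ z := by
              rcases List.mem_cons.1 hz with rfl | hz'
              · exact le_rfl
              · exact le_of_lt (hxlt z (List.mem_append_left _ hz'))
            have hmem : (n - z) ∈ x :: (mid ++ [y]) ↔ (n - z) ∈ x :: mid := by
              constructor
              · intro hm
                rcases List.mem_cons.1 hm with hx' | hm'
                · exact hx' ▸ List.mem_cons_self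
                · rcases List.mem_append.1 hm' with h' | h'
                  · exact List.mem_cons_of_mem _ h'
                  · have := List.mem_singleton.1 h'; omega
              · intro hm
                rcases List.mem_cons.1 hm with hx' | hm'
                · exact hx' ▸ List.mem_cons_self
                · exact List.mem_cons_of_mem _ (List.mem_append_left _ hm')
            simp only [pvTerm, hmem]
          symm
          calc ((x :: (mid ++ [y])).map (pvTerm n d (x :: (mid ++ [y])))).sum
              = pvTerm n d (x :: (mid ++ [y])) x
                + ((mid.map (pvTerm n d (x :: (mid ++ [y])))).sum
                  + pvTerm n d (x :: (mid ++ [y])) y) := by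
                simp
            _ = ((x :: mid).map (pvTerm n d (x :: (mid ++ [y])))).sum := by
                rw [hty]; simp
            _ = ((x :: mid).map (pvTerm n d (x :: mid))).sum := by
                rw [List.map_congr_left hcong]

theorem sum_dedup_ite_count (l : List Int) (P : Int → Bool) :
    ((l.dedup).map (fun k => if P k then (l.count k : Int) else 0)).sum = (l.countP P : Int) := by
  induction l with
  | nil => simp
  | cons a t ih =>
    have hsplit : ∀ k : Int,
        (if P k then ((a :: t).count k : Int) else 0)
          = (if P k then (t.count k : Int) else 0) + (if P k && k == a then 1 else 0) := by
      intro k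
      by_cases hp : P k
      · by_cases hka : k = a
        · subst hka; simp [hp, List.count_cons_self]
        · simp [hp, hka, List.count_cons_of_ne (Ne.symm hka)]
      · simp [hp]
    by_cases ha : a ∈ t
    · rw [List.dedup_cons_of_mem ha]
      calc ((t.dedup).map (fun k => if P k then ((a :: t).count k : Int) else 0)).sum
          = ((t.dedup).map (fun k => (if P k then (t.count k : Int) else 0) + (if P k && k == a then 1 else 0))).sum := by
            exact congrArg _ (List.map_congr_left (fun k _ => hsplit k))
        _ = (t.countP P : Int) + ((t.dedup).map (fun k => if P k && k == a then (1:Int) else 0)).sum := by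
            rw [PySem.List.sum_map_add_int, ih]
        _ = (t.countP P : Int) + (t.dedup.countP (fun k => P k && k == a) : Int) := by
            rw [PySem.List.sum_map_ite_one_zero]
        _ = ((a :: t).countP P : Int) := by
            rw [List.countP_cons]
            by_cases hp : P a
            · have : t.dedup.countP (fun k => P k && k == a) = t.dedup.count a := by
                apply List.countP_congr
                intro x hx
                simp only [Bool.and_eq_true, beq_iff_eq]
                constructor
                · rintro ⟨_, h⟩; simp [h]
                · intro h; simp at h; subst h; exact ⟨hp, rfl⟩
              rw [this, List.count_eq_one_of_mem (List.nodup_dedup t) (List.mem_dedup.2 ha)]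
              simp [hp]
            · have : t.dedup.countP (fun k => P k && k == a) = 0 := by
                apply List.countP_eq_zero.2
                intro x hx
                simp only [Bool.and_eq_true, beq_iff_eq, not_and]
                intro h hxa; subst hxa; exact absurd h (by simpa using hp)
              simp [this, hp]
    · rw [List.dedup_cons_of_notMem ha]
      simp only [List.map_cons, List.sum_cons]
      calc (if P a then ((a :: t).count a : Int) else 0)
            + ((t.dedup).map (fun k => if P k then ((a :: t).count k : Int) else 0)).sum
          = (if P a then ((a :: t).count a : Int) else 0)
            + ((t.dedup).map (fun k => if P k then (t.count k : Int) else 0)).sum := by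
            congr 1
            apply congrArg
            apply List.map_congr_left
            intro k hk
            have hka : k ≠ a := fun h => ha (h ▸ List.mem_dedup.1 hk)
            simp [Ne.symm hka]
        _ = ((a :: t).countP P : Int) := by
            rw [ih, List.countP_cons, List.count_cons_self,
              List.count_eq_zero_of_not_mem ha]
            by_cases hp : P a <;> (simp [hp]; try omega)

theorem sum_ofList_ite_count (l : List Int) (P : Int → Bool) :
    ((PySem.Set.ofList l).map (fun k => if P k then (l.count k : Int) else 0)).sum = (l.countP P : Int) := by
  have hperm : (PySem.Set.ofList l).Perm l.dedup := by
    apply List.perm_of_nodup_nodup_toFinset_eq (PySem.Set.nodup_ofList l) (List.nodup_dedup l)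
    ext x
    simp [PySem.Set.mem_ofList, List.mem_dedup]
  rw [List.Perm.sum_eq (hperm.map _), sum_dedup_ite_count]

theorem pv_main (n : Int) (l : List Int) :
    check_goldbach_for_num_stats n l = check_goldbach_for_num_stats_alt n l := by
  unfold check_goldbach_for_num_stats check_goldbach_for_num_stats_alt
  dsimp only
  rw [PySem.Dict.foldl_insert_getD_add_one_eq_counter]
  -- A's loop counter, as two counts over l
  have hA : l.foldl (fun cnt item =>
      if (n - item) ∈ l then
        (if (n - item) == item then (cnt + 1) + 1 else cnt + 1)
      else cnt) 0
      = (l.countP (fun x => l.contains (n - x)) : Int)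
        + (l.countP (fun x => l.contains (n - x) && ((n - x) == x)) : Int) := by
    have hbody : ∀ (cnt : Int) (x : Int), (if (n - x) ∈ l then
        (if (n - x) == x then (cnt + 1) + 1 else cnt + 1) else cnt)
        = cnt + ((if l.contains (n - x) = true then (1:Int) else 0)
               + (if (l.contains (n - x) && ((n - x) == x)) = true then (1:Int) else 0)) := by
      intro cnt x
      by_cases hm : (n - x) ∈ l
      · have hc : l.contains (n - x) = true := List.contains_iff_mem.2 hm
        cases hbe : ((n - x) == x) <;>
          · simp [hm]; try omega
      · have hc : l.contains (n - x) = false := by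
          rw [Bool.eq_false_iff]; exact fun h => hm (List.contains_iff_mem.1 h)
        rw [if_neg hm, hc]; norm_num
    rw [PySem.List.foldl_congr_mem _ _ _ _ (fun acc x _ => hbody acc x)]
    rw [PySem.List.foldl_add, PySem.List.sum_map_add_int,
        PySem.List.sum_map_ite_one_zero, PySem.List.sum_map_ite_one_zero]
    ring
  rw [hA]
  -- B's sweep total, via the window invariant
  have hpw : (PySem.List.sorted (PySem.Dict.counter l).keys (fun x => x) false).Pairwise (· < ·) := by
    rw [PySem.Dict.keys_counter]
    exact PySem.List.sorted_ofList_pairwise_lt (xs := l)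
  have hwin : ((PySem.List.sorted (PySem.Dict.counter l).keys (fun x => x) false).drop (0:Int).toNat).take
      (((PySem.List.sorted (PySem.Dict.counter l).keys (fun x => x) false).length : Int) - 1 - 0 + 1).toNat
      = PySem.List.sorted (PySem.Dict.counter l).keys (fun x => x) false := by
    have h1 : (((PySem.List.sorted (PySem.Dict.counter l).keys (fun x => x) false).length : Int) - 1 - 0 + 1).toNat
        = (PySem.List.sorted (PySem.Dict.counter l).keys (fun x => x) false).length := by omega
    rw [h1]
    simp
  rw [pvSweepIdx_eq_window n (PySem.Dict.counter l) _
      (((PySem.List.sorted (PySem.Dict.counter l).keys (fun x => x) false).length : Int) - 1 + 1 - 0).toNat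
      0 (((PySem.List.sorted (PySem.Dict.counter l).keys (fun x => x) false).length : Int) - 1)
      le_rfl le_rfl (by omega) 0, hwin]
  rw [pvSweep_eq n (PySem.Dict.counter l) (PySem.List.sorted (PySem.Dict.counter l).keys (fun x => x) false).length (PySem.List.sorted (PySem.Dict.counter l).keys (fun x => x) false) le_rfl hpw 0]
  have hmem : ∀ w : Int, w ∈ PySem.List.sorted (PySem.Dict.counter l).keys (fun x => x) false ↔ w ∈ l := by
    intro w
    rw [PySem.List.mem_sorted, PySem.Dict.keys_counter, PySem.Set.mem_ofList]
  have hterm : ∀ z ∈ PySem.List.sorted (PySem.Dict.counter l).keys (fun x => x) false,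
      pvTerm n (PySem.Dict.counter l) (PySem.List.sorted (PySem.Dict.counter l).keys (fun x => x) false) z
      = (if (decide ((n - z) ∈ l)) = true then (l.count z : Int) else 0)
        + (if (decide (z + z = n)) = true then (l.count z : Int) else 0) := by
    intro z _
    simp only [pvTerm, PySem.Dict.getD_counter, hmem (n - z), decide_eq_true_eq]
  rw [List.map_congr_left hterm, PySem.List.sum_map_add_int]
  have hperm : (PySem.List.sorted (PySem.Dict.counter l).keys (fun x => x) false).Perm (PySem.Set.ofList l) := by
    rw [PySem.Dict.keys_counter]
    exact PySem.List.sorted_perm _ _ _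
  rw [List.Perm.sum_eq (hperm.map _), List.Perm.sum_eq (hperm.map _),
      sum_ofList_ite_count, sum_ofList_ite_count]
  -- the two pairs of counts agree
  have hc1 : l.countP (fun x => decide ((n - x) ∈ l)) = l.countP (fun x => l.contains (n - x)) := by
    apply List.countP_congr
    intro x _
    simp
  have hc2 : l.countP (fun x => decide (x + x = n))
      = l.countP (fun x => l.contains (n - x) && ((n - x) == x)) := by
    apply List.countP_congr
    intro x hx
    simp only [decide_eq_true_eq, Bool.and_eq_true, beq_iff_eq, List.contains_iff_mem]
    constructor
    · intro h
      have : n - x = x := by omega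
      refine ⟨?_, this⟩
      rw [this]; exact hx
    · rintro ⟨_, h⟩; omega
  rw [hc1, hc2]
  rw [PySem.Int.floordiv_eq_ediv_of_pos (by norm_num), zero_add]
  unfold PySem.Int.truncdiv
  exact Int.tdiv_eq_ediv_of_nonneg (by positivity)

-- ===== VERDICT (by name: the statement is the Claim_ definition above) =====
theorem check_goldbach_for_num_stats_spec : Claim_equal_check_goldbach_for_num_stats := by
  intro n primes_set _
  exact pv_main n primes_set
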